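-- pv_equiv track=rewrite | github.com/Gabrielkaos/CatalinaTransformers | CATALINA_MODELS/SEQ2SEQ/LANGUAGE_TRANSLATIONS/CatalinaTranslateWaray/data_cleaning.py | remove_second_splitter
-- ===== SOURCE A (Python) =====
-- def remove_second_splitter(line):
--     new_line = []
--     count = 0
--     for char in line:
--         count += char == ":"
--
--         if count > 1 and char == ":":
--             continue
--         new_line.append(char)
--
--     return "".join(new_line)
-- ===== SOURCE B (Python) =====
-- def remove_second_splitter(line):
--     head, sep, tail = line.partition(':')
--     return head + sep + tail.replace(':', '')
-- ===== Notes on version B (the rewrite author's own statement) =====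
-- stated objective: idiomatic
-- what changed: Replaced the char-by-char loop with a running colon counter and conditional skip by partition at the first colon followed by replace on the tail; no counter or per-character append remains.
import Mathlib
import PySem

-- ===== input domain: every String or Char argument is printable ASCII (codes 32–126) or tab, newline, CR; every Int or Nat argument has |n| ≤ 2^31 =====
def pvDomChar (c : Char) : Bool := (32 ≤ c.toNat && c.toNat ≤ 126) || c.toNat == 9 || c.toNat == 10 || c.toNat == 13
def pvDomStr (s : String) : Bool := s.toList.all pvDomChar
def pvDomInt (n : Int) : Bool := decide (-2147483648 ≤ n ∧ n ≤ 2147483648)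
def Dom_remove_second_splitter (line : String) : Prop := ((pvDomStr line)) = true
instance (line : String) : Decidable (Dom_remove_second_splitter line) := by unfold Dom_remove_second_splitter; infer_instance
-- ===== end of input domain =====

-- B drops the counter-driven skip loop: it partitions at the first colon and strips colons from the tail (idiomatic; same O(n) cost).

-- ===== PORT A =====
-- A's loop: new_line accumulator and a running colon count, skipping ':' once count > 1.
def rssLoopA : List Char → Nat → List Char → List Char
  | [], _, acc => acc
  | c :: cs, count, acc =>
      let count' := count + (if c = ':' then 1 else 0)
      if count' > 1 ∧ c = ':' then rssLoopA cs count' acc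
      else rssLoopA cs count' (acc ++ [c])

def remove_second_splitter (line : String) : String :=
  String.ofList (rssLoopA line.toList 0 [])

-- ===== PORT B =====
-- head, sep, tail = line.partition(':')  — span at the first colon; tail.replace(':','') — filter.
def remove_second_splitter_alt (line : String) : String :=
  let head := line.toList.takeWhile (· ≠ ':')
  match line.toList.dropWhile (· ≠ ':') with
  | [] => String.ofList head
  | sep :: tail => String.ofList (head ++ [sep] ++ tail.filter (· ≠ ':'))

-- ===== PRECONDITION & SPEC =====
def Spec_remove_second_splitter (line : String) (out : String) : Prop := out = remove_second_splitter_alt line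
instance (line : String) (out : String) : Decidable (Spec_remove_second_splitter line out) := by unfold Spec_remove_second_splitter; infer_instance

-- ===== CLAIM (what is proved, stated in full; the proofs are below) =====
def Claim_equal_remove_second_splitter : Prop := ∀ (line : String), Dom_remove_second_splitter line → Spec_remove_second_splitter line (remove_second_splitter line)

-- ===== LEMMAS AND PROOFS =====

-- Once at least one colon has been seen, A's loop just filters out colons.
theorem rssLoopA_filter (cs : List Char) : ∀ (count : Nat) (acc : List Char), 1 ≤ count →
    rssLoopA cs count acc = acc ++ cs.filter (· ≠ ':') := by
  induction cs with
  | nil => intro count acc h; simp [rssLoopA]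
  | cons c cs ih =>
    intro count acc h
    by_cases hc : c = ':'
    · have : count + (if c = ':' then 1 else 0) > 1 ∧ c = ':' := by
        refine ⟨?_, hc⟩; simp [hc]; omega
      simp only [rssLoopA, if_pos this]
      rw [ih _ _ (by omega)]
      simp [List.filter, hc]
    · have hn : ¬ (count + (if c = ':' then 1 else 0) > 1 ∧ c = ':') := by
        intro ⟨_, h2⟩; exact hc h2
      simp only [rssLoopA, if_neg hn]
      rw [ih _ _ (by simpa [hc] using h)]
      simp [List.filter, hc]

-- With count 0, the loop is: keep the span before the first colon, keep that colon, filter the rest.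
theorem rssLoopA_zero (cs : List Char) : ∀ (acc : List Char),
    rssLoopA cs 0 acc =
      acc ++ cs.takeWhile (· ≠ ':') ++
        (match cs.dropWhile (· ≠ ':') with
         | [] => []
         | sep :: tail => sep :: tail.filter (· ≠ ':')) := by
  induction cs with
  | nil => intro acc; simp [rssLoopA]
  | cons c cs ih =>
    intro acc
    by_cases hc : c = ':'
    · have hn : ¬ (0 + (if c = ':' then 1 else 0) > 1 ∧ c = ':') := by
        simp [hc]
      simp only [rssLoopA, if_neg hn]
      rw [rssLoopA_filter cs _ _ (by simp [hc])]
      simp [hc]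
    · have hn : ¬ (0 + (if c = ':' then 1 else 0) > 1 ∧ c = ':') := by
        intro ⟨_, h2⟩; exact hc h2
      simp only [rssLoopA, if_neg hn]
      have h0 : (0 : Nat) + (if c = ':' then 1 else 0) = 0 := by simp [hc]
      rw [h0, ih]
      simp [hc]

-- ===== VERDICT (by name: the statement is the Claim_ definition above) =====
theorem remove_second_splitter_spec : Claim_equal_remove_second_splitter := by
  intro line _
  unfold Spec_remove_second_splitter remove_second_splitter remove_second_splitter_alt
  rw [rssLoopA_zero]
  cases h : line.toList.dropWhile (· ≠ ':') <;> simp
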